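-- pv_equiv track=rewrite | github.com/PacktPublishing/Advanced-Data-Structures-and-Algorithms-in-Python | Section 1/6_math.py | square_free
-- ===== SOURCE A (Python) =====
-- def square_free(n):
--
--     count = 0
--     for i in range(1, n+1):
--         ok = True
--         for j in range(2, i):
--             if i % (j*j) == 0:
--                 ok = False
--                 break
--         if ok:
--             count += 1
--
--     return count
-- ===== SOURCE B (Python) =====
-- def square_free(n):
--     marked = set()
--     j = 2
--     while j * j <= n:
--         marked.update(range(j * j, n + 1, j * j))
--         j += 1
--     return sum(1 for i in range(1, n + 1) if i not in marked)
-- ===== Notes on version B (the rewrite author's own statement) =====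
-- stated objective: faster
-- what changed: Replaces the per-number trial-division inner loop (all j up to i) with a sieve that marks multiples of each square j*j for j*j <= n in a set, then counts the unmarked numbers.
import Mathlib
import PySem

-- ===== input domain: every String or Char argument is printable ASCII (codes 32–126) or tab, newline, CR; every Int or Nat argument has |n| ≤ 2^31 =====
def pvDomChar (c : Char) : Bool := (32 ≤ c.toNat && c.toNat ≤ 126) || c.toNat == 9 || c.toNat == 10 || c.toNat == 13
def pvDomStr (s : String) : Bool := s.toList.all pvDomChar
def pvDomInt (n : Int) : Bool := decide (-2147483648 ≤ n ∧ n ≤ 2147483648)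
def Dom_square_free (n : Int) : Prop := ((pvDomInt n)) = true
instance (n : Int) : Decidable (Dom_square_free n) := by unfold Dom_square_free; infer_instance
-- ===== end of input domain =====

-- B replaces A's per-number trial division by a sieve over squares; measurably faster (asymptotic).

-- ===== PORT A =====
-- inner loop 'for j in range(2, i): if i % (j*j) == 0: ok = False; break'
def pvInnerA (i : Int) : List Int → Bool
  | [] => true
  | j :: rest => if PySem.Int.mod i (j * j) == 0 then false else pvInnerA i rest

def square_free (n : Int) : Int :=
  (PySem.List.pyRange 1 (n + 1) 1).foldl
    (fun count i => if pvInnerA i (PySem.List.pyRange 2 i 1) then count + 1 else count) 0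

-- ===== PORT B =====
-- 'while j*j <= n: marked.update(range(j*j, n+1, j*j)); j += 1'
def pvSieve (n j : Int) (marked : PySem.Set Int) : PySem.Set Int :=
  if _h : j * j ≤ n then
    pvSieve n (j + 1) (PySem.Set.update marked (PySem.List.pyRange (j * j) (n + 1) (j * j)))
  else marked
termination_by (n + 1 - j).toNat
decreasing_by
  have hj : j ≤ n := by nlinarith
  omega

def square_free_alt (n : Int) : Int :=
  let marked := pvSieve n 2 PySem.Set.empty
  (PySem.List.pyRange 1 (n + 1) 1).foldl
    (fun acc i => if !(PySem.Set.contains marked i) then acc + 1 else acc) 0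

-- ===== PRECONDITION & SPEC =====
def Spec_square_free (n : Int) (out : Int) : Prop := out = square_free_alt n
instance (n : Int) (out : Int) : Decidable (Spec_square_free n out) := by unfold Spec_square_free; infer_instance

-- ===== CLAIM (what is proved, stated in full; the proofs are below) =====
def Claim_equal_square_free : Prop := ∀ (n : Int), Dom_square_free n → Spec_square_free n (square_free n)

-- ===== LEMMAS AND PROOFS =====

theorem pvInnerA_eq_all (i : Int) (l : List Int) :
    pvInnerA i l = l.all (fun j => !(PySem.Int.mod i (j * j) == 0)) := by
  induction l with
  | nil => rfl
  | cons j rest ih =>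
    simp only [pvInnerA, List.all_cons]
    split
    · next h => simp [h]
    · next h => simp [h, ih]

theorem pvSieve_mem (n : Int) (j : Int) (marked : PySem.Set Int) (x : Int) :
    0 ≤ j → (x ∈ pvSieve n j marked ↔
      x ∈ marked ∨ ∃ k, j ≤ k ∧ k * k ≤ n ∧ x ∈ PySem.List.pyRange (k * k) (n + 1) (k * k)) := by
  fun_induction pvSieve n j marked with
  | case1 j marked h ih =>
    intro hj
    rw [ih (by omega)]
    simp only [PySem.Set.mem_update]
    constructor
    · rintro ((hx | hx) | ⟨k, hk1, hk2, hk3⟩)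
      · exact Or.inl hx
      · exact Or.inr ⟨j, le_refl j, h, hx⟩
      · exact Or.inr ⟨k, by omega, hk2, hk3⟩
    · rintro (hx | ⟨k, hk1, hk2, hk3⟩)
      · exact Or.inl (Or.inl hx)
      · rcases eq_or_lt_of_le hk1 with rfl | hlt
        · exact Or.inl (Or.inr hk3)
        · exact Or.inr ⟨k, by omega, hk2, hk3⟩
  | case2 j marked h =>
    intro hj
    constructor
    · exact Or.inl
    · rintro (hx | ⟨k, hk1, hk2, _⟩)
      · exact hx
      · exfalso
        have : j * j ≤ n := by nlinarith [mul_le_mul hk1 hk1 hj (le_trans hj hk1)]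
        exact h this

theorem pvMarked_iff (n x : Int) :
    x ∈ pvSieve n 2 PySem.Set.empty ↔
      ∃ k, 2 ≤ k ∧ k * k ≤ n ∧ k * k ≤ x ∧ x ≤ n ∧ (k * k) ∣ x := by
  rw [pvSieve_mem n 2 PySem.Set.empty x (by omega)]
  simp only [PySem.Set.empty, List.not_mem_nil, false_or]
  constructor
  · rintro ⟨k, hk1, hk2, hk3⟩
    have hpos : 0 < k * k := by nlinarith
    rw [PySem.List.mem_pyRange_iff_of_pos hpos] at hk3
    obtain ⟨h1, h2, h3⟩ := hk3
    have hdvd : (k * k) ∣ x := by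
      have := dvd_add h3 (dvd_refl (k * k))
      simpa using this
    exact ⟨k, hk1, hk2, h1, by omega, hdvd⟩
  · rintro ⟨k, hk1, hk2, hk3, hk4, hk5⟩
    have hpos : 0 < k * k := by nlinarith
    refine ⟨k, hk1, hk2, (PySem.List.mem_pyRange_iff_of_pos hpos x).mpr ⟨hk3, by omega, ?_⟩⟩
    exact dvd_sub hk5 dvd_rfl

theorem square_free_eq_countP (n : Int) :
    square_free n = ((PySem.List.pyRange 1 (n + 1) 1).countP
      (fun i => pvInnerA i (PySem.List.pyRange 2 i 1)) : Int) := by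
  unfold square_free
  rw [PySem.List.foldl_if_add_one]
  simp

theorem square_free_alt_eq_countP (n : Int) :
    square_free_alt n = ((PySem.List.pyRange 1 (n + 1) 1).countP
      (fun i => !(PySem.Set.contains (pvSieve n 2 PySem.Set.empty) i)) : Int) := by
  unfold square_free_alt
  rw [PySem.List.foldl_if_add_one]
  simp

theorem pvPointwise (n i : Int) (h1 : 1 ≤ i) (h2 : i < n + 1) :
    pvInnerA i (PySem.List.pyRange 2 i 1)
      = !(PySem.Set.contains (pvSieve n 2 PySem.Set.empty) i) := by
  rw [pvInnerA_eq_all, Bool.eq_iff_iff]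
  have hmem : (!(PySem.Set.contains (pvSieve n 2 PySem.Set.empty) i)) = true
      ↔ i ∉ pvSieve n 2 PySem.Set.empty := by
    simp
  rw [hmem, List.all_eq_true, pvMarked_iff]
  constructor
  · rintro hall ⟨k, hk2, hkn, hki, hin, hdvd⟩
    have hkmem : k ∈ PySem.List.pyRange 2 i 1 := by
      rw [PySem.List.mem_pyRange_one]
      constructor
      · exact hk2
      · nlinarith
    have := hall k hkmem
    rw [← PySem.Int.mod_eq_zero_iff_dvd] at hdvd
    simp [hdvd] at this
  · intro hnot j hj
    rw [PySem.List.mem_pyRange_one] at hj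
    by_contra hbad
    have hmod : PySem.Int.mod i (j * j) = 0 := by
      simpa using hbad
    rw [PySem.Int.mod_eq_zero_iff_dvd] at hmod
    have hle : j * j ≤ i := Int.le_of_dvd (by omega) hmod
    exact hnot ⟨j, hj.1, by omega, hle, by omega, hmod⟩

-- ===== VERDICT (by name: the statement is the Claim_ definition above) =====
theorem square_free_spec : Claim_equal_square_free := by
  intro n _
  unfold Spec_square_free
  rw [square_free_eq_countP, square_free_alt_eq_countP]
  congr 1
  apply List.countP_congr
  intro i hi
  rw [PySem.List.mem_pyRange_one] at hi
  rw [pvPointwise n i hi.1 hi.2]
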